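-- pv_equiv track=rewrite | github.com/AIk1r/Codewars-Python | 6-kyu/Moves in squared strings (II).py | selfie_and_rot
-- ===== SOURCE A (Python) =====
-- def selfie_and_rot(strng):
--     res = []
--     s = ''
--     for i in strng.split():
--         s += i + (len(i)*'.')+'\n'
--     a = s+s[::-1]
--     for i in a.split():
--         res.append(i)
--     return '\n'.join(res)
-- ===== SOURCE B (Python) =====
-- def selfie_and_rot(strng):
--     rows = [w + '.' * len(w) for w in strng.split()]
--     tail = [r[::-1] for r in reversed(rows)]
--     return '\n'.join(rows + tail)
-- ===== Notes on version B (the rewrite author's own statement) =====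
-- stated objective: simpler
-- what changed: B builds the selfie rows directly as a list and forms the rotation half by reversing each row and the row order, instead of A's building one big string, concatenating its full character-wise reversal and re-splitting the result.
import Mathlib
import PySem

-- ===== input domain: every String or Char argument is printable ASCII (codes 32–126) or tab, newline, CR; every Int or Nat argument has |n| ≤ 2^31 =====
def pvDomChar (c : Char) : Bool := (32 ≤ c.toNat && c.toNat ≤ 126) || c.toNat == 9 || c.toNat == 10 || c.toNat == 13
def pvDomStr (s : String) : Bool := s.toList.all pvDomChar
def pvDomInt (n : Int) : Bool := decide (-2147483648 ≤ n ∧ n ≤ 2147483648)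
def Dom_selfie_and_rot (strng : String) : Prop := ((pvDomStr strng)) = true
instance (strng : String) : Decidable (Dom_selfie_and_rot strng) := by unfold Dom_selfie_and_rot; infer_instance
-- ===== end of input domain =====

-- B replaces A's whole-string concatenation + full reversal + re-split by building the
-- selfie rows as a list and reversing each row and the row order explicitly (objective: simpler).

-- ===== PORT A =====
def selfie_and_rot (strng : String) : String :=
  -- res = []; s = ''; for i in strng.split(): s += i + (len(i)*'.') + '\n'
  let s : List Char :=
    (PySem.Chars.split₀ strng.toList).foldl
      (fun s i => s ++ (i ++ List.replicate (PySem.Chars.len i).toNat '.' ++ ['\n'])) []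
  -- a = s + s[::-1]   (s[::-1] is the reversed string)
  let a : List Char := s ++ s.reverse
  -- for i in a.split(): res.append(i)
  let res : List (List Char) := (PySem.Chars.split₀ a).foldl (fun res i => res ++ [i]) []
  -- return '\n'.join(res)
  String.ofList (PySem.Chars.join ['\n'] res)

-- ===== PORT B =====
def selfie_and_rot_alt (strng : String) : String :=
  -- rows = [w + '.'*len(w) for w in strng.split()]
  let rows : List (List Char) :=
    (PySem.Chars.split₀ strng.toList).map (fun w => w ++ List.replicate w.length '.')
  -- tail = [r[::-1] for r in reversed(rows)]
  let tail : List (List Char) := rows.reverse.map (fun r => r.reverse)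
  -- return '\n'.join(rows + tail)
  String.ofList (PySem.Chars.join ['\n'] (rows ++ tail))

-- ===== PRECONDITION & SPEC =====
def Spec_selfie_and_rot (strng : String) (out : String) : Prop := out = selfie_and_rot_alt strng
instance (strng : String) (out : String) : Decidable (Spec_selfie_and_rot strng out) := by unfold Spec_selfie_and_rot; infer_instance

-- ===== CLAIM (what is proved, stated in full; the proofs are below) =====
def Claim_equal_selfie_and_rot : Prop := ∀ (strng : String), Dom_selfie_and_rot strng → Spec_selfie_and_rot strng (selfie_and_rot strng)

-- ===== LEMMAS AND PROOFS =====

-- A "word" : nonempty and free of whitespace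
def pvWord (w : List Char) : Prop := w ≠ [] ∧ ∀ c ∈ w, PySem.Chars.isspace c = false

-- consuming non-whitespace characters just accumulates them into cur
theorem pv_go_nonspace (w : List Char) (hw : ∀ c ∈ w, PySem.Chars.isspace c = false)
    (t cur : List Char) (acc : List (List Char)) :
    PySem.Chars.split₀.go (w ++ t) cur acc = PySem.Chars.split₀.go t (w.reverse ++ cur) acc := by
  induction w generalizing cur with
  | nil => simp
  | cons c w ih =>
    have hc : PySem.Chars.isspace c = false := hw c (by simp)
    simp only [List.cons_append, PySem.Chars.split₀.go, hc, Bool.false_eq_true, if_false]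
    rw [ih (fun d hd => hw d (by simp [hd]))]
    simp

-- every element produced by split₀.go (from a clean state) is a word
theorem pv_go_words (s cur : List Char) (acc : List (List Char))
    (hcur : ∀ c ∈ cur, PySem.Chars.isspace c = false)
    (hacc : ∀ w ∈ acc, pvWord w) :
    ∀ w ∈ PySem.Chars.split₀.go s cur acc, pvWord w := by
  induction s generalizing cur acc with
  | nil =>
    intro w hw
    simp only [PySem.Chars.split₀.go] at hw
    by_cases h : cur = []
    · rw [if_pos (by simp [h])] at hw
      exact hacc w (List.mem_reverse.mp hw)
    · rw [if_neg (by simp [h])] at hw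
      rw [List.mem_reverse, List.mem_cons] at hw
      rcases hw with rfl | hw
      · exact ⟨by simpa using h, fun c hc => hcur c (by simpa using hc)⟩
      · exact hacc w hw
  | cons c s ih =>
    intro w hw
    simp only [PySem.Chars.split₀.go] at hw
    by_cases hc : PySem.Chars.isspace c = true
    · simp only [hc, if_true] at hw
      by_cases h : cur = []
      · simp [h] at hw
        exact ih [] acc (by simp) hacc w hw
      · simp [List.isEmpty_iff, h] at hw
        refine ih [] (cur.reverse :: acc) (by simp) ?_ w hw
        intro v hv
        rcases List.mem_cons.mp hv with hv | hv
        · subst hv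
          exact ⟨by simpa using h, fun d hd => hcur d (by simpa using hd)⟩
        · exact hacc v hv
    · simp only [hc] at hw
      refine ih (c :: cur) acc ?_ hacc w hw
      intro d hd
      rcases List.mem_cons.mp hd with hd | hd
      · subst hd; simpa using hc
      · exact hcur d hd

theorem pv_split₀_words (s : List Char) : ∀ w ∈ PySem.Chars.split₀ s, pvWord w := by
  simpa [PySem.Chars.split₀] using pv_go_words s [] [] (by simp) (by simp)

-- the front half: blocks "row ++ '\n'" are flushed one by one
theorem pv_go_front (rows : List (List Char)) (h : ∀ r ∈ rows, pvWord r)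
    (t : List Char) (acc : List (List Char)) :
    PySem.Chars.split₀.go ((rows.map (fun r => r ++ ['\n'])).flatten ++ t) [] acc
      = PySem.Chars.split₀.go t [] (rows.reverse ++ acc) := by
  induction rows generalizing acc with
  | nil => simp
  | cons r rows ih =>
    obtain ⟨hne, hns⟩ := h r (by simp)
    simp only [List.map_cons, List.flatten_cons, List.append_assoc]
    rw [pv_go_nonspace r hns]
    simp only [List.append_nil]
    have hnl : PySem.Chars.isspace '\n' = true := by decide
    simp only [List.cons_append, PySem.Chars.split₀.go, hnl, if_true,
      List.isEmpty_iff, List.reverse_eq_nil_iff, hne, if_false, List.reverse_reverse,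
      List.nil_append]
    rw [ih (fun v hv => h v (by simp [hv]))]
    simp

-- the back half: blocks "'\n' ++ row" (cur may be carrying a word)
theorem pv_go_tail (ts : List (List Char)) (h : ∀ r ∈ ts, pvWord r)
    (cur : List Char) (acc : List (List Char)) :
    PySem.Chars.split₀.go ((ts.map (fun r => '\n' :: r)).flatten) cur acc
      = (ts.reverse ++ (if cur.isEmpty then acc else cur.reverse :: acc)).reverse := by
  induction ts generalizing cur acc with
  | nil =>
    simp only [List.map_nil, List.flatten_nil, PySem.Chars.split₀.go, List.reverse_nil,
      List.nil_append]
    by_cases hc : cur.isEmpty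
    · simp [hc]
    · simp [hc]
  | cons r ts ih =>
    obtain ⟨hne, hns⟩ := h r (by simp)
    have hts : ∀ v ∈ ts, pvWord v := fun v hv => h v (by simp [hv])
    have hnl : PySem.Chars.isspace '\n' = true := by decide
    have key : ∀ acc', PySem.Chars.split₀.go (r ++ (ts.map (fun r => '\n' :: r)).flatten) [] acc'
        = ((r :: ts).reverse ++ acc').reverse := by
      intro acc'
      rw [pv_go_nonspace r hns, ih hts]
      simp [List.isEmpty_iff, hne]
    simp only [List.map_cons, List.flatten_cons, List.cons_append, PySem.Chars.split₀.go,
      hnl, if_true]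
    by_cases hc : cur.isEmpty
    · rw [if_pos hc, key]; simp [hc]
    · rw [if_neg hc, key]; simp [hc]

-- rows built from words are themselves words ('.' is not whitespace)
theorem pv_rows_words (s : List Char) :
    ∀ r ∈ (PySem.Chars.split₀ s).map (fun w => w ++ List.replicate w.length '.'), pvWord r := by
  intro r hr
  rcases List.mem_map.mp hr with ⟨w, hw, rfl⟩
  obtain ⟨hne, hns⟩ := pv_split₀_words s w hw
  constructor
  · simp [hne]
  · intro c hc
    rcases List.mem_append.mp hc with hc | hc
    · exact hns c hc
    · have := List.eq_of_mem_replicate hc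
      subst this; decide

-- the central fact: split₀ of s ++ reverse s, for s built from the rows
theorem pv_split_selfie (rows : List (List Char)) (h : ∀ r ∈ rows, pvWord r) :
    PySem.Chars.split₀ ((rows.map (fun r => r ++ ['\n'])).flatten
        ++ ((rows.map (fun r => r ++ ['\n'])).flatten).reverse)
      = rows ++ rows.reverse.map (fun r => r.reverse) := by
  have hrev : ((rows.map (fun r => r ++ ['\n'])).flatten).reverse
      = ((rows.reverse.map (fun r => r.reverse)).map (fun r => '\n' :: r)).flatten := by
    simp [List.reverse_flatten, List.map_map, Function.comp_def, List.map_reverse]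
  rw [PySem.Chars.split₀, hrev, pv_go_front rows h, pv_go_tail]
  · simp
  · intro v hv
    rcases List.mem_map.mp hv with ⟨u, hu, rfl⟩
    obtain ⟨hne, hns⟩ := h u (List.mem_reverse.mp hu)
    exact ⟨by simpa using hne, fun c hc => hns c (List.mem_reverse.mp hc)⟩

-- ===== VERDICT (by name: the statement is the Claim_ definition above) =====
theorem selfie_and_rot_spec : Claim_equal_selfie_and_rot := by
  intro strng _
  unfold Spec_selfie_and_rot
  simp only [selfie_and_rot, selfie_and_rot_alt]
  rw [PySem.List.foldl_append_singleton]
  rw [PySem.List.foldl_append_eq_flatMap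
        (fun i => i ++ List.replicate (PySem.Chars.len i).toNat '.' ++ ['\n'])]
  simp only [List.nil_append, List.flatMap_def]
  have hmap : (PySem.Chars.split₀ strng.toList).map
        (fun i => i ++ List.replicate (PySem.Chars.len i).toNat '.' ++ ['\n'])
      = ((PySem.Chars.split₀ strng.toList).map
          (fun w => w ++ List.replicate w.length '.')).map (fun r => r ++ ['\n']) := by
    simp [List.map_map, Function.comp, PySem.Chars.len]
  rw [hmap, pv_split_selfie _ (pv_rows_words strng.toList)]
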